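-- pv_equiv track=rewrite | github.com/ericbgarnick/AOC | 2020/day20/day20.py | flip_on_1
-- ===== SOURCE A (Python) =====
-- from typing import Dict, Set, Union, List, Optional
--
-- def flip_on_1(image: List[str]) -> List[str]:
--     n = len(image)
--     last = n - 1
--     flipped = [["" for _ in range(n)] for _ in range(n)]
--     for row in range(last, -1, -1):
--         for col in range(last - row, n):
--             flipped[row][col], flipped[last - col][last - row] = image[last - col][last - row], image[row][col]
--     return ["".join(row) for row in flipped]
-- ===== SOURCE B (Python) =====
-- def flip_on_1(image):
--     n = len(image)
--     return ["".join(image[n - 1 - c][n - 1 - r] for c in range(n)) for r in range(n)]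
-- ===== Notes on version B (the rewrite author's own statement) =====
-- stated objective: idiomatic
-- what changed: A fills a mutable n-by-n table by walking the lower-right triangle backwards and swap-assigning each cell together with its anti-diagonal mirror; B builds the result directly as a double comprehension reading result[r][c] = image[n-1-c][n-1-r], with no mutable table and no paired swaps.
import Mathlib
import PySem

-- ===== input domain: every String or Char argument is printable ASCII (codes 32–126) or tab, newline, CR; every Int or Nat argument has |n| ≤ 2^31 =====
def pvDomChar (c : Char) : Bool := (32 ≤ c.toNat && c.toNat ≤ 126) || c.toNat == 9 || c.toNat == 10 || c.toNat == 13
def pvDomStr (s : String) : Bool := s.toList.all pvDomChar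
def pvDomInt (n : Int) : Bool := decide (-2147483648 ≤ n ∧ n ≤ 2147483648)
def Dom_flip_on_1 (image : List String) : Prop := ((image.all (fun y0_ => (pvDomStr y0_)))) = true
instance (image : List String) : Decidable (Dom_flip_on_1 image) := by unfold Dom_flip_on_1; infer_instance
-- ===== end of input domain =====

-- B replaces A's in-place triangle-walk with paired mirror swaps by a direct double
-- comprehension result[r][c] = image[n-1-c][n-1-r] (idiomatic; same O(n^2) cost).


-- ===== PORT A =====
-- image[r][c] as the one-character Python string; "" only at indices Python would
-- raise on, which Pre_ excludes (the default is never reached inside Pre_).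
def pvCellA (image : List String) (r c : Int) : String :=
  match PySem.List.pyGet? image r with
  | some s =>
    match PySem.Str.pyGet? s c with
    | some ch => String.ofList [ch]
    | none => ""
  | none => ""

-- flipped[r][c] = v  (in-range inside the loops; pySetD/pyGetD are total forms)
def pvWrite (g : List (List String)) (r c : Int) (v : String) : List (List String) :=
  PySem.List.pySetD g r (PySem.List.pySetD (PySem.List.pyGetD g r []) c v)

-- the body of A's inner loop: RHS pair read from image first, then the two assignments
def pvBody (image : List String) (last : Int) (g : List (List String)) (row col : Int) :
    List (List String) :=
  pvWrite (pvWrite g row col (pvCellA image (last - col) (last - row)))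
    (last - col) (last - row) (pvCellA image row col)

def flip_on_1 (image : List String) : List String :=
  let n : Int := image.length
  let last : Int := n - 1
  let init : List (List String) :=
    List.replicate image.length (List.replicate image.length "")
  let final : List (List String) :=
    (PySem.List.pyRange last (-1) (-1)).foldl
      (fun g row =>
        (PySem.List.pyRange (last - row) n 1).foldl
          (fun g col => pvBody image last g row col) g) init
  final.map (fun row => PySem.Str.join "" row)

-- ===== PORT B =====
def flip_on_1_alt (image : List String) : List String :=
  let n : Int := image.length
  (PySem.List.pyRange 0 n 1).map (fun r =>
    PySem.Str.join "" ((PySem.List.pyRange 0 n 1).map (fun c =>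
      match PySem.Str.pyGet? (PySem.List.pyGetD image (n - 1 - c) "") (n - 1 - r) with
      | some ch => String.ofList [ch]
      | none => "")))

-- ===== PRECONDITION & SPEC =====
-- Pre_ excludes exactly the ragged inputs on which A raises IndexError: some row
-- shorter than the number of rows (A indexes every row at positions up to n-1).
def Pre_flip_on_1 (image : List String) : Prop :=
  ∀ s ∈ image, (image.length : Int) ≤ PySem.Str.len s
instance (image : List String) : Decidable (Pre_flip_on_1 image) := by
  unfold Pre_flip_on_1; infer_instance
def pvWitness_flip_on_1 : List String := ["ab", "cd"]
def Spec_flip_on_1 (image : List String) (out : List String) : Prop := out = flip_on_1_alt image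
instance (image : List String) (out : List String) : Decidable (Spec_flip_on_1 image out) := by unfold Spec_flip_on_1; infer_instance

-- ===== CLAIM (what is proved, stated in full; the proofs are below) =====
def Claim_equal_flip_on_1 : Prop := ∀ (image : List String), Dom_flip_on_1 image → Pre_flip_on_1 image → Spec_flip_on_1 image (flip_on_1 image)

-- ===== LEMMAS AND PROOFS =====
-- the value both programs put at (r, c)
def pvCell (image : List String) (r c : Int) : String :=
  pvCellA image ((image.length : Int) - 1 - c) ((image.length : Int) - 1 - r)

def pvGet2 (g : List (List String)) (r c : Nat) : String := (g.getD r []).getD c ""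

def pvSq (g : List (List String)) (n : Nat) : Prop :=
  g.length = n ∧ ∀ row ∈ g, row.length = n

-- the pair of cells written by iteration (k, j) of A's loops (row = n-1-k, col = k+j)
abbrev pvHit (n k j r c : Nat) : Prop :=
  (r + k + 1 = n ∧ c = k + j) ∨ (r + k + j + 1 = n ∧ c = k)

theorem pv_set_getD {α : Type} (l : List α) (i : Nat) (x : α) (j : Nat) (d : α) :
    (l.set i x).getD j d = if i = j ∧ i < l.length then x else l.getD j d := by
  simp only [List.getD_eq_getElem?_getD, List.getElem?_set]
  split_ifs with h1 h2 h3 <;> simp_all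
  omega

theorem pvWrite_natCast (g : List (List String)) (p q : Nat) (v : String) :
    pvWrite g (p : Int) (q : Int) v = g.set p ((g.getD p []).set q v) := by
  simp [pvWrite]

theorem pv_getD_mem {g : List (List String)} {p n : Nat} (hlen : g.length = n)
    (hp : p < n) : g.getD p [] ∈ g := by
  rw [List.getD_eq_getElem g [] (by omega)]
  exact List.getElem_mem _

theorem pvSq_write {g : List (List String)} {n : Nat} (hg : pvSq g n)
    {p q : Nat} (hp : p < n) (v : String) :
    pvSq (pvWrite g (p : Int) (q : Int) v) n := by
  obtain ⟨hlen, hrows⟩ := hg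
  rw [pvWrite_natCast]
  refine ⟨by simpa using hlen, ?_⟩
  intro row hrow
  rcases List.mem_or_eq_of_mem_set hrow with h | h
  · exact hrows row h
  · subst h
    rw [List.length_set]
    exact hrows _ (pv_getD_mem hlen hp)

theorem pvGet2_write {g : List (List String)} {n : Nat} (hg : pvSq g n)
    {p q : Nat} (hp : p < n) (hq : q < n) (v : String) (r c : Nat) :
    pvGet2 (pvWrite g (p : Int) (q : Int) v) r c
      = if r = p ∧ c = q then v else pvGet2 g r c := by
  obtain ⟨hlen, hrows⟩ := hg
  have hrowlen : (g.getD p []).length = n := hrows _ (pv_getD_mem hlen hp)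
  rw [pvWrite_natCast]
  unfold pvGet2
  rw [pv_set_getD]
  by_cases hrp : r = p
  · subst hrp
    rw [if_pos ⟨rfl, by omega⟩, pv_set_getD]
    by_cases hcq : c = q
    · subst hcq
      rw [if_pos ⟨rfl, by omega⟩, if_pos ⟨rfl, rfl⟩]
    · rw [if_neg (by tauto), if_neg (by tauto)]
  · rw [if_neg (by tauto), if_neg (by tauto)]

theorem pvBody_char (image : List String) (k j : Nat)
    (hk : k < image.length) (hkj : k + j < image.length)
    (g : List (List String)) (hg : pvSq g image.length) :
    pvSq (pvBody image ((image.length : Int) - 1) g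
        ((image.length : Int) - 1 - (k : Int)) ((k : Int) + (j : Int))) image.length ∧
    ∀ r c : Nat,
      pvGet2 (pvBody image ((image.length : Int) - 1) g
          ((image.length : Int) - 1 - (k : Int)) ((k : Int) + (j : Int))) r c
        = if pvHit image.length k j r c then pvCell image (r : Int) (c : Int)
          else pvGet2 g r c := by
  set n := image.length with hn
  have e1 : (n : Int) - 1 - (k : Int) = ((n - 1 - k : Nat) : Int) := by omega
  have e2 : (k : Int) + (j : Int) = ((k + j : Nat) : Int) := by omega
  have e3 : (n : Int) - 1 - ((k : Int) + (j : Int)) = ((n - 1 - (k + j) : Nat) : Int) := by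
    omega
  have e4 : (n : Int) - 1 - ((n : Int) - 1 - (k : Int)) = ((k : Nat) : Int) := by omega
  have hb : pvBody image ((n : Int) - 1) g ((n : Int) - 1 - (k : Int)) ((k : Int) + (j : Int))
      = pvWrite (pvWrite g ((n - 1 - k : Nat) : Int) ((k + j : Nat) : Int)
          (pvCellA image ((n - 1 - (k + j) : Nat) : Int) ((k : Nat) : Int)))
        ((n - 1 - (k + j) : Nat) : Int) ((k : Nat) : Int)
        (pvCellA image ((n - 1 - k : Nat) : Int) ((k + j : Nat) : Int)) := by
    unfold pvBody
    rw [e3, e4, e1, e2]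
  -- the two written values are the cells of the flipped image at their positions
  have v1 : pvCellA image ((n - 1 - (k + j) : Nat) : Int) ((k : Nat) : Int)
      = pvCell image ((n - 1 - k : Nat) : Int) ((k + j : Nat) : Int) := by
    unfold pvCell
    rw [← hn]
    congr 1 <;> omega
  have v2 : pvCellA image ((n - 1 - k : Nat) : Int) ((k + j : Nat) : Int)
      = pvCell image ((n - 1 - (k + j) : Nat) : Int) ((k : Nat) : Int) := by
    unfold pvCell
    rw [← hn]
    congr 1 <;> omega
  have hsq1 : pvSq (pvWrite g ((n - 1 - k : Nat) : Int) ((k + j : Nat) : Int)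
      (pvCellA image ((n - 1 - (k + j) : Nat) : Int) ((k : Nat) : Int))) n :=
    pvSq_write hg (by omega) _
  refine ⟨?_, ?_⟩
  · rw [hb]
    exact pvSq_write hsq1 (by omega) _
  · intro r c
    rw [hb, pvGet2_write hsq1 (by omega) (by omega),
      pvGet2_write hg (by omega) (by omega)]
    by_cases h2 : r = n - 1 - (k + j) ∧ c = k
    · rw [if_pos h2, if_pos (Or.inr ⟨by omega, by omega⟩), h2.1, h2.2]
      exact v2
    · rw [if_neg h2]
      by_cases h1 : r = n - 1 - k ∧ c = k + j
      · rw [if_pos h1, if_pos (Or.inl ⟨by omega, by omega⟩), h1.1, h1.2]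
        exact v1
      · rw [if_neg h1, if_neg (by unfold pvHit; omega)]

theorem pvInner_char (image : List String) (k : Nat) (hk : k < image.length) :
    ∀ m : Nat, m ≤ image.length - k → ∀ g : List (List String), pvSq g image.length →
    pvSq ((List.range m).foldl
        (fun g (j : Nat) => pvBody image ((image.length : Int) - 1) g
          ((image.length : Int) - 1 - (k : Int)) ((k : Int) + (j : Int))) g) image.length ∧
    ∀ r c : Nat,
      pvGet2 ((List.range m).foldl
          (fun g (j : Nat) => pvBody image ((image.length : Int) - 1) g
            ((image.length : Int) - 1 - (k : Int)) ((k : Int) + (j : Int))) g) r c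
        = if ∃ j, j < m ∧ pvHit image.length k j r c then pvCell image (r : Int) (c : Int)
          else pvGet2 g r c := by
  intro m
  induction m with
  | zero =>
    intro _ g hg
    refine ⟨hg, fun r c => ?_⟩
    rw [if_neg (by rintro ⟨x, hx, -⟩; omega)]
    simp
  | succ m ih =>
    intro hm g hg
    obtain ⟨ihsq, ihget⟩ := ih (by omega) g hg
    rw [List.range_succ, List.foldl_append, List.foldl_cons, List.foldl_nil]
    obtain ⟨bsq, bget⟩ := pvBody_char image k m hk (by omega) _ ihsq
    refine ⟨bsq, fun r c => ?_⟩
    rw [bget, ihget]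
    by_cases hb : pvHit image.length k m r c
    · rw [if_pos hb, if_pos ⟨m, by omega, hb⟩]
    · rw [if_neg hb]
      by_cases he : ∃ j, j < m ∧ pvHit image.length k j r c
      · obtain ⟨j, hjm, hj⟩ := he
        rw [if_pos ⟨j, hjm, hj⟩, if_pos ⟨j, by omega, hj⟩]
      · have hnone : ¬ ∃ j, j < m + 1 ∧ pvHit image.length k j r c := by
          rintro ⟨j, hjm, hj⟩
          rcases Nat.lt_or_ge j m with h | h
          · exact he ⟨j, h, hj⟩
          · have hjm' : j = m := by omega
            subst hjm'
            exact hb hj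
        rw [if_neg he, if_neg hnone]

theorem pvOuter_char (image : List String) :
    ∀ m : Nat, m ≤ image.length → ∀ g : List (List String), pvSq g image.length →
    pvSq ((List.range m).foldl
        (fun g (k : Nat) => (List.range (image.length - k)).foldl
          (fun g (j : Nat) => pvBody image ((image.length : Int) - 1) g
            ((image.length : Int) - 1 - (k : Int)) ((k : Int) + (j : Int))) g) g) image.length ∧
    ∀ r c : Nat,
      pvGet2 ((List.range m).foldl
          (fun g (k : Nat) => (List.range (image.length - k)).foldl
            (fun g (j : Nat) => pvBody image ((image.length : Int) - 1) g
              ((image.length : Int) - 1 - (k : Int)) ((k : Int) + (j : Int))) g) g) r c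
        = if ∃ k, k < m ∧ ∃ j, j < image.length - k ∧ pvHit image.length k j r c
          then pvCell image (r : Int) (c : Int) else pvGet2 g r c := by
  intro m
  induction m with
  | zero =>
    intro _ g hg
    refine ⟨hg, fun r c => ?_⟩
    rw [if_neg (by rintro ⟨x, hx, -⟩; omega)]
    simp
  | succ m ih =>
    intro hm g hg
    obtain ⟨ihsq, ihget⟩ := ih (by omega) g hg
    rw [List.range_succ, List.foldl_append, List.foldl_cons, List.foldl_nil]
    obtain ⟨isq, iget⟩ := pvInner_char image m (by omega) (image.length - m) le_rfl _ ihsq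
    refine ⟨isq, fun r c => ?_⟩
    rw [iget, ihget]
    by_cases hb : ∃ j, j < image.length - m ∧ pvHit image.length m j r c
    · rw [if_pos hb, if_pos ⟨m, by omega, hb⟩]
    · rw [if_neg hb]
      by_cases he : ∃ k, k < m ∧ ∃ j, j < image.length - k ∧ pvHit image.length k j r c
      · obtain ⟨k, hkm, hj⟩ := he
        rw [if_pos ⟨k, hkm, hj⟩, if_pos ⟨k, by omega, hj⟩]
      · have hnone : ¬ ∃ k, k < m + 1 ∧ ∃ j, j < image.length - k ∧ pvHit image.length k j r c := by
          rintro ⟨k, hkm, hj⟩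
          rcases Nat.lt_or_ge k m with h | h
          · exact he ⟨k, h, hj⟩
          · have hkm' : k = m := by omega
            subst hkm'
            exact hb hj
        rw [if_neg he, if_neg hnone]

theorem pvCovered (n r c : Nat) (hr : r < n) (hc : c < n) :
    ∃ k, k < n ∧ ∃ j, j < n - k ∧ pvHit n k j r c := by
  by_cases h : n ≤ r + c + 1
  · exact ⟨n - 1 - r, by omega, c - (n - 1 - r), by omega, Or.inl ⟨by omega, by omega⟩⟩
  · exact ⟨c, by omega, n - 1 - c - r, by omega, Or.inr ⟨by omega, rfl⟩⟩

theorem pvSq_init (n : Nat) : pvSq (List.replicate n (List.replicate n "")) n := by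
  refine ⟨by simp, fun row hrow => ?_⟩
  rw [List.eq_of_mem_replicate hrow]
  simp

theorem pvCell_eq (image : List String) (r c : Int) :
    (match PySem.Str.pyGet? (PySem.List.pyGetD image r "") c with
     | some ch => String.ofList [ch]
     | none => "") = pvCellA image r c := by
  unfold pvCellA PySem.List.pyGetD
  cases h : PySem.List.pyGet? image r with
  | none => simp [PySem.Str.pyGet?, PySem.Chars.pyGet?, PySem.List.pyGet?]
  | some s => rfl

theorem pvRange_down (n : Nat) :
    PySem.List.pyRange ((n : Int) - 1) (-1) (-1)
      = (List.range n).map (fun (k : Nat) => (n : Int) - 1 - (k : Int)) := by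
  rw [PySem.List.pyRange_neg_one]
  have h : ((n : Int) - 1 - -1).toNat = n := by omega
  rw [h]

theorem pvRange_up (n k : Nat) :
    PySem.List.pyRange (k : Int) (n : Int) 1
      = (List.range (n - k)).map (fun (j : Nat) => (k : Int) + (j : Int)) := by
  rw [PySem.List.pyRange_one]
  have h : ((n : Int) - k).toNat = n - k := by omega
  rw [h]

theorem pvRange_zero_up (n : Nat) :
    PySem.List.pyRange 0 (n : Int) 1 = (List.range n).map (fun (k : Nat) => (k : Int)) := by
  have h := pvRange_up n 0
  simpa using h

def pvFinal (image : List String) : List (List String) :=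
  (List.range image.length).foldl
    (fun g (k : Nat) => (List.range (image.length - k)).foldl
      (fun g (j : Nat) => pvBody image ((image.length : Int) - 1) g
        ((image.length : Int) - 1 - (k : Int)) ((k : Int) + (j : Int))) g)
    (List.replicate image.length (List.replicate image.length ""))

theorem pvFinal_char (image : List String) :
    pvSq (pvFinal image) image.length ∧
    ∀ r c : Nat, r < image.length → c < image.length →
      pvGet2 (pvFinal image) r c = pvCell image (r : Int) (c : Int) := by
  obtain ⟨hsq, hget⟩ := pvOuter_char image image.length le_rfl _ (pvSq_init image.length)
  refine ⟨hsq, fun r c hr hc => ?_⟩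
  show pvGet2 _ r c = _
  rw [show pvGet2 (pvFinal image) r c
      = pvGet2 ((List.range image.length).foldl
        (fun g (k : Nat) => (List.range (image.length - k)).foldl
          (fun g (j : Nat) => pvBody image ((image.length : Int) - 1) g
            ((image.length : Int) - 1 - (k : Int)) ((k : Int) + (j : Int))) g)
        (List.replicate image.length (List.replicate image.length ""))) r c from rfl,
    hget, if_pos (pvCovered image.length r c hr hc)]

theorem flip_on_1_eq_canonical (image : List String) :
    flip_on_1 image = (List.range image.length).map (fun (r : Nat) =>
      PySem.Str.join "" ((List.range image.length).map
        (fun (c : Nat) => pvCell image (r : Int) (c : Int)))) := by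
  show List.map (fun row => PySem.Str.join "" row)
      (List.foldl
        (fun g row => List.foldl (fun g col => pvBody image ((image.length : Int) - 1) g row col)
          g (PySem.List.pyRange (((image.length : Int) - 1) - row) (image.length : Int) 1))
        (List.replicate image.length (List.replicate image.length ""))
        (PySem.List.pyRange ((image.length : Int) - 1) (-1) (-1))) = _
  rw [pvRange_down, List.foldl_map]
  have hbody : ∀ (g : List (List String)) (k : Nat), k ∈ List.range image.length →
      (PySem.List.pyRange ((image.length : Int) - 1 - ((image.length : Int) - 1 - (k : Int)))
        (image.length : Int) 1).foldl
        (fun g col => pvBody image ((image.length : Int) - 1) g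
          ((image.length : Int) - 1 - (k : Int)) col) g
      = (List.range (image.length - k)).foldl
        (fun g (j : Nat) => pvBody image ((image.length : Int) - 1) g
          ((image.length : Int) - 1 - (k : Int)) ((k : Int) + (j : Int))) g := by
    intro g k _
    have e : (image.length : Int) - 1 - ((image.length : Int) - 1 - (k : Int)) = (k : Int) := by
      omega
    rw [e, pvRange_up, List.foldl_map]
  have hfold := PySem.List.foldl_congr_mem (List.range image.length) _ _
    (List.replicate image.length (List.replicate image.length "")) hbody
  rw [hfold]
  show (pvFinal image).map (fun row => PySem.Str.join "" row) = _
  obtain ⟨⟨hlen, hrows⟩, hget⟩ := pvFinal_char image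
  apply List.ext_getElem
  · simp [hlen]
  · intro r h1 h2
    have hr : r < image.length := by simpa using h2
    rw [List.getElem_map, List.getElem_map, List.getElem_range]
    refine congrArg _ ?_
    have hrowlen : (pvFinal image)[r].length = image.length :=
      hrows _ (List.getElem_mem _)
    apply List.ext_getElem
    · simp [hrowlen]
    · intro c h3 h4
      have hc : c < image.length := by rwa [hrowlen] at h3
      rw [List.getElem_map, List.getElem_range]
      have hgc := hget r c hr hc
      unfold pvGet2 at hgc
      rw [List.getD_eq_getElem _ [] (by omega), List.getD_eq_getElem _ "" (by omega)] at hgc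
      exact hgc

theorem flip_on_1_alt_eq_canonical (image : List String) :
    flip_on_1_alt image = (List.range image.length).map (fun (r : Nat) =>
      PySem.Str.join "" ((List.range image.length).map
        (fun (c : Nat) => pvCell image (r : Int) (c : Int)))) := by
  show List.map (fun r =>
      PySem.Str.join "" (List.map (fun c =>
        match PySem.Str.pyGet? (PySem.List.pyGetD image ((image.length : Int) - 1 - c) "")
            ((image.length : Int) - 1 - r) with
        | some ch => String.ofList [ch]
        | none => "") (PySem.List.pyRange 0 (image.length : Int) 1)))
      (PySem.List.pyRange 0 (image.length : Int) 1) = _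
  rw [pvRange_zero_up]
  simp only [List.map_map, Function.comp_def]
  apply List.map_congr_left
  intro r _
  refine congrArg _ ?_
  apply List.map_congr_left
  intro c _
  rw [pvCell_eq]
  rfl

-- ===== VERDICT (by name: the statement is the Claim_ definition above) =====
theorem flip_on_1_spec : Claim_equal_flip_on_1 := by
  intro image _ _
  unfold Spec_flip_on_1
  rw [flip_on_1_eq_canonical, flip_on_1_alt_eq_canonical]
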